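-- pv_equiv track=rewrite | github.com/appley/advent2024 | 1201.py | similarity_scores
-- ===== SOURCE A (Python) =====
-- def similarity_scores(lists):
--
--     def check_and_remove(num, list, total):
--         if num not in list:
--             return total
--         else:
--             total += 1
--             list.remove(num)
--             return check_and_remove(num, list, total)
--
--     total = 0
--     lista = lists[0]
--     listb = lists[1]
--
--     for i in lista:
--         num_occurences = check_and_remove(
--             i, listb, 0)
--         if num_occurences != 0:
--             score = i * num_occurences
--             total += score
--
--     return total
-- ===== SOURCE B (Python) =====
-- def similarity_scores(lists):
--     seta = set(lists[0])
--     return sum(x for x in lists[1] if x in seta)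
-- ===== Notes on version B (the rewrite author's own statement) =====
-- stated objective: simpler
-- what changed: Replaces A's loop over lista with recursive count-and-remove passes over listb by a single pass over listb summing elements that belong to set(lista).
import Mathlib
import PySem

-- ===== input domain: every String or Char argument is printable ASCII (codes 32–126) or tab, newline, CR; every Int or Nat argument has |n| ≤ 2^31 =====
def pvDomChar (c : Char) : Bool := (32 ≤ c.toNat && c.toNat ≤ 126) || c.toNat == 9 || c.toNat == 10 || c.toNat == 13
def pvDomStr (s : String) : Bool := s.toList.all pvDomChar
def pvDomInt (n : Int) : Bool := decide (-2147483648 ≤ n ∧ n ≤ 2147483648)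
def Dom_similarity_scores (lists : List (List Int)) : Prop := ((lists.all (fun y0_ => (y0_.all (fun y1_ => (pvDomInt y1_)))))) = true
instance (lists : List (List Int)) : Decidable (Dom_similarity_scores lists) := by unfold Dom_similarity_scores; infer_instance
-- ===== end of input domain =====

-- B replaces A's per-element count-and-remove scans of listb by one membership-filtered pass over listb with a set of lista (simpler).
-- Python A mutates lists[1] in place (removes matched elements); the equivalence proved here is about the RETURN value only — B does not mutate.

-- ===== PORT A =====
-- check_and_remove: returns total occurrences removed; the list argument is threaded (Python mutates it)
def pvCheckAndRemove (num : Int) (l : List Int) (total : Int) : Int × List Int :=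
  if h : num ∈ l then
    pvCheckAndRemove num ((PySem.List.remove? l num).getD l) (total + 1)
  else
    (total, l)
termination_by l.length
decreasing_by
  rw [PySem.List.remove?_eq_some_erase l num h]
  have h1 : 1 ≤ l.length := List.length_pos_of_mem h
  simp [List.length_erase_of_mem h]
  omega

def pvLoopA (lista listb : List Int) (total : Int) : Int :=
  match lista with
  | [] => total
  | i :: rest =>
    let r := pvCheckAndRemove i listb 0
    if r.1 ≠ 0 then pvLoopA rest r.2 (total + i * r.1)
    else pvLoopA rest r.2 total

def similarity_scores (lists : List (List Int)) : Int :=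
  pvLoopA ((PySem.List.pyGet? lists 0).getD []) ((PySem.List.pyGet? lists 1).getD []) 0

-- ===== PORT B =====
def similarity_scores_alt (lists : List (List Int)) : Int :=
  let seta : PySem.Set Int := PySem.Set.ofList ((PySem.List.pyGet? lists 0).getD [])
  ((PySem.List.pyGet? lists 1).getD []).foldl
    (fun acc x => if PySem.Set.contains seta x then acc + x else acc) 0

-- ===== PRECONDITION & SPEC =====
-- A raises IndexError (lists[0] / lists[1]) when lists has fewer than two elements; B raises there too.
def Pre_similarity_scores (lists : List (List Int)) : Prop := 2 ≤ lists.length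
instance (lists : List (List Int)) : Decidable (Pre_similarity_scores lists) := by unfold Pre_similarity_scores; infer_instance
def pvWitness_similarity_scores : List (List Int) := [[1, 2, 2], [2, 2, 3]]

def Spec_similarity_scores (lists : List (List Int)) (out : Int) : Prop := out = similarity_scores_alt lists
instance (lists : List (List Int)) (out : Int) : Decidable (Spec_similarity_scores lists out) := by unfold Spec_similarity_scores; infer_instance

-- ===== CLAIM (what is proved, stated in full; the proofs are below) =====
def Claim_equal_similarity_scores : Prop := ∀ (lists : List (List Int)), Dom_similarity_scores lists → Pre_similarity_scores lists → Spec_similarity_scores lists (similarity_scores lists)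

-- ===== LEMMAS AND PROOFS =====
theorem filter_ne_erase (l : List Int) (num : Int) :
    (l.erase num).filter (fun x => x ≠ num) = l.filter (fun x => x ≠ num) := by
  induction l with
  | nil => simp
  | cons a t ih =>
    by_cases ha : a = num
    · subst ha; simp [List.erase_cons_head]
    · rw [List.erase_cons_tail (by simpa using ha)]
      simp only [List.filter_cons, ih]

theorem pvCheckAndRemove_eq (num : Int) (l : List Int) (total : Int) :
    pvCheckAndRemove num l total = (total + (l.count num : Int), l.filter (fun x => x ≠ num)) := by
  fun_induction pvCheckAndRemove num l total with
  | case1 l total h ih =>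
    rw [PySem.List.remove?_eq_some_erase l num h] at ih ⊢
    simp only [Option.getD_some] at ih ⊢
    rw [ih, List.count_erase_self, filter_ne_erase]
    have hc : 1 ≤ l.count num := List.one_le_count_iff.mpr h
    have : (total + 1 + ((List.count num l - 1 : Nat) : Int)) = total + (List.count num l : Int) := by
      push_cast [hc]; ring
    rw [this]
  | case2 l total h =>
    have hc : l.count num = 0 := List.count_eq_zero.mpr h
    rw [List.filter_eq_self.mpr (by intro a ha; simp; rintro rfl; exact h ha)]
    simp [hc]

theorem sum_filter_cons (i : Int) (rest lb : List Int) :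
    (lb.filter (fun x => decide (x = i) || decide (x ∈ rest))).sum
      = i * (lb.count i : Int)
        + (lb.filter (fun a => decide (a ∈ rest) && !decide (a = i))).sum := by
  induction lb with
  | nil => simp
  | cons x t ih =>
    by_cases hx : x = i
    · subst hx
      by_cases hm : x ∈ rest <;>
        · simp only [List.filter_cons, List.count_cons_self, hm, decide_true, decide_false,
            Bool.or_true, Bool.true_or, Bool.and_true, Bool.true_and, Bool.and_false,
            Bool.false_and, Bool.not_true, if_true, if_false, List.sum_cons, ih]
          push_cast; ring
    · have hcnt : List.count i (x :: t) = List.count i t := by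
        simp [List.count_cons, show i ≠ x from fun e => hx e.symm]; exact hx
      by_cases hm : x ∈ rest
      · simp only [List.filter_cons, hcnt, hx, hm, decide_true, decide_false, Bool.false_or,
          Bool.true_and, Bool.not_false, Bool.and_true, if_true, List.sum_cons, ih]
        ring
      · simp only [List.filter_cons, hcnt, hx, hm, decide_true, decide_false, Bool.false_or,
          Bool.false_and, Bool.and_false, Bool.false_eq_true, if_false, ih]

theorem pvLoopA_eq (lista : List Int) : ∀ (listb : List Int) (total : Int),
    pvLoopA lista listb total = total + (listb.filter (fun x => decide (x ∈ lista))).sum := by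
  induction lista with
  | nil => intro listb total; simp [pvLoopA]
  | cons i rest ih =>
    intro listb total
    rw [pvLoopA]
    have hsplit : (listb.filter (fun x => decide (x ∈ i :: rest))).sum
        = i * (listb.count i : Int)
          + (listb.filter (fun a => decide (a ∈ rest) && !decide (a = i))).sum := by
      rw [List.filter_congr (q := fun x => decide (x = i) || decide (x ∈ rest))
        (by intro x _; simp [List.mem_cons])]
      exact sum_filter_cons i rest listb
    simp only [pvCheckAndRemove_eq]
    by_cases hz : (0 + (listb.count i : Int)) ≠ 0
    · rw [if_pos (by simpa using hz), ih, hsplit, List.filter_filter]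
      rw [List.filter_congr (l := listb)
        (q := fun a => decide (a ∈ rest) && !decide (a = i)) (by intro x _; simp [Bool.and_comm])]
      ring
    · rw [if_neg (by simpa using hz), ih, hsplit, List.filter_filter]
      rw [List.filter_congr (l := listb)
        (q := fun a => decide (a ∈ rest) && !decide (a = i)) (by intro x _; simp [Bool.and_comm])]
      have hc0 : (listb.count i : Int) = 0 := by omega
      rw [hc0]; ring

theorem pvFoldB_eq (p : Int → Bool) (lb : List Int) (a : Int) :
    lb.foldl (fun acc x => if p x then acc + x else acc) a = a + (lb.filter p).sum := by
  induction lb generalizing a with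
  | nil => simp
  | cons x t ih =>
    by_cases h : p x
    · simp only [List.foldl_cons, List.filter_cons, h, if_pos, ih]; simp; ring
    · simp only [List.foldl_cons, List.filter_cons, h, if_neg, ih]; simp [h]

-- ===== VERDICT (by name: the statement is the Claim_ definition above) =====
theorem similarity_scores_spec : Claim_equal_similarity_scores := by
  intro lists _ _
  unfold Spec_similarity_scores similarity_scores similarity_scores_alt
  rw [pvFoldB_eq, pvLoopA_eq]
  congr 1
  apply congrArg List.sum
  apply List.filter_congr
  intro x _
  by_cases h : x ∈ (PySem.List.pyGet? lists 0).getD [] <;>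
    simp [h, PySem.Set.contains_iff, PySem.Set.mem_ofList]
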